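-- pv_equiv track=rewrite | github.com/Derling/algorithms | challenges/cannibal_numbers.py | cannibals
-- ===== SOURCE A (Python) =====
-- def cannibals(int_set, query):
--     int_set = sorted(int_set)
--     count = 0
--     while len(int_set) > 1:
--         if int_set[-1] >= query:
--             int_set.pop()
--             count += 1
--         else:
--             int_set[-1] = int_set[-1] + 1
--             int_set.pop(0)
--     return count if int_set[0] != query else count + 1
-- ===== SOURCE B (Python) =====
-- def cannibals(int_set, query):
--     arr = sorted(int_set)
--     lo, hi = 0, len(arr) - 1
--     boost = 0  # increments applied to the current top element arr[hi]
--     count = 0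
--     while lo < hi:
--         if arr[hi] + boost >= query:
--             hi -= 1
--             count += 1
--             boost = 0
--         else:
--             boost += 1
--             lo += 1
--     return count if arr[hi] + boost != query else count + 1
-- ===== Notes on version B (the rewrite author's own statement) =====
-- stated objective: faster
-- what changed: Replaces A's destructive loop with pop()/pop(0) on a shrinking list by a two-pointer scan over the sorted array with a running boost for the current top, removing the O(n) pop(0) shifts.
import Mathlib
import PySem

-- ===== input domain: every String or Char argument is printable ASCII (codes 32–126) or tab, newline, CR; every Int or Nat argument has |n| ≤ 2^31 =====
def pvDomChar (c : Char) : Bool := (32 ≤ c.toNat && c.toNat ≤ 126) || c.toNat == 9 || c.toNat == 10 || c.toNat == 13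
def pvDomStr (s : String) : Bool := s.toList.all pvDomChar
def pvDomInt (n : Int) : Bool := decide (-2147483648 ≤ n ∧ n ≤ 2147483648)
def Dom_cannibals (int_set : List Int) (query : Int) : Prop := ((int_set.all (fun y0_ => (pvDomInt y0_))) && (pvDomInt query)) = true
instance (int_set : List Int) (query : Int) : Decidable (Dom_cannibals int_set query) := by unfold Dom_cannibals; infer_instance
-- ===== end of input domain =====

-- B replaces A's destructive pop()/pop(0) loop by a two-pointer scan with a running boost (faster: no O(n) head pops).

-- ===== PORT A =====
-- A's while loop: the list shrinks by one element each iteration.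
def cannibalsLoopA (xs : List Int) (query : Int) (count : Int) : Int :=
  if h : 1 < xs.length then
    -- int_set[-1]
    let t := xs.getLast (by intro hnil; simp [hnil] at h)
    if t ≥ query then
      cannibalsLoopA xs.dropLast query (count + 1)          -- pop(); count += 1
    else
      cannibalsLoopA (xs.tail.dropLast ++ [t + 1]) query count  -- int_set[-1] += 1; pop(0)
  else
    -- return count if int_set[0] != query else count + 1  (list has exactly one element on Pre_)
    if xs.headD 0 ≠ query then count else count + 1
termination_by xs.length
decreasing_by
  · simp [List.length_dropLast]; omega
  · simp [List.length_dropLast, List.length_tail]; omega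

def cannibals (int_set : List Int) (query : Int) : Int :=
  cannibalsLoopA (PySem.List.sorted int_set (fun x => x) false) query 0

-- ===== PORT B =====
def cannibalsLoopB (arr : List Int) (query : Int) (lo hi : Nat) (boost count : Int) : Int :=
  if _h : lo < hi then
    if arr.getD hi 0 + boost ≥ query then
      cannibalsLoopB arr query lo (hi - 1) 0 (count + 1)
    else
      cannibalsLoopB arr query (lo + 1) hi (boost + 1) count
  else
    if arr.getD hi 0 + boost ≠ query then count else count + 1
termination_by hi - lo
decreasing_by all_goals omega

def cannibals_alt (int_set : List Int) (query : Int) : Int :=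
  let arr := PySem.List.sorted int_set (fun x => x) false
  cannibalsLoopB arr query 0 (arr.length - 1) 0 0

-- ===== PRECONDITION & SPEC =====
-- Pre_ excludes the empty list, on which Python A raises IndexError (int_set[0]); B raises there too.
def Pre_cannibals (int_set : List Int) (query : Int) : Prop := int_set ≠ []
instance (int_set : List Int) (query : Int) : Decidable (Pre_cannibals int_set query) := by unfold Pre_cannibals; infer_instance
def pvWitness_cannibals : List Int × Int := ([3, 1, 2], 4)
def Spec_cannibals (int_set : List Int) (query : Int) (out : Int) : Prop := out = cannibals_alt int_set query
instance (int_set : List Int) (query : Int) (out : Int) : Decidable (Spec_cannibals int_set query out) := by unfold Spec_cannibals; infer_instance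

-- ===== CLAIM (what is proved, stated in full; the proofs are below) =====
def Claim_equal_cannibals : Prop := ∀ (int_set : List Int) (query : Int), Dom_cannibals int_set query → Pre_cannibals int_set query → Spec_cannibals int_set query (cannibals int_set query)

-- ===== LEMMAS AND PROOFS =====

-- A's working list after some steps of B's pointers: arr[lo:hi] with the top arr[hi]+boost appended.
def reprList (arr : List Int) (lo hi : Nat) (boost : Int) : List Int :=
  (arr.drop lo).take (hi - lo) ++ [arr.getD hi 0 + boost]

theorem loop_agree (n : Nat) : ∀ (arr : List Int) (query : Int) (lo hi : Nat) (boost count : Int),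
    hi - lo = n → lo ≤ hi → hi < arr.length →
    cannibalsLoopA (reprList arr lo hi boost) query count = cannibalsLoopB arr query lo hi boost count := by
  induction n with
  | zero =>
    intro arr query lo hi boost count hn hle hlt
    have hlo : lo = hi := by omega
    subst hlo
    rw [cannibalsLoopA, cannibalsLoopB]
    simp [reprList]
  | succ m ih =>
    intro arr query lo hi boost count hn hle hlt
    have hlohi : lo < hi := by omega
    have hdlen : (arr.drop lo).length = arr.length - lo := by simp
    have htake : ((arr.drop lo).take (hi - lo)).length = hi - lo := by
      rw [List.length_take]; omega
    rw [cannibalsLoopA, cannibalsLoopB]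
    have hlen : 1 < (reprList arr lo hi boost).length := by
      simp [reprList, htake]; omega
    rw [dif_pos hlen, dif_pos hlohi]
    have hlast : (reprList arr lo hi boost).getLast (by intro hnil; simp [hnil] at hlen)
        = arr.getD hi 0 + boost := by
      simp [reprList]
    rw [hlast]
    by_cases hq : arr.getD hi 0 + boost ≥ query
    · rw [if_pos hq, if_pos hq]
      have hrepr : (reprList arr lo hi boost).dropLast = reprList arr lo (hi - 1) 0 := by
        simp only [reprList, List.dropLast_concat]
        have h1 : hi - lo = (hi - 1 - lo) + 1 := by omega
        rw [h1, List.take_add_one]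
        congr 1
        have hidx : hi - 1 - lo < (arr.drop lo).length := by omega
        rw [List.getElem?_eq_getElem hidx]
        have hb : hi - 1 < arr.length := by omega
        have hix : lo + (hi - 1 - lo) = hi - 1 := by omega
        have : (arr.drop lo)[hi - 1 - lo] = arr[hi - 1]'hb := by
          rw [List.getElem_drop]
          simp only [hix]
        rw [this, List.getD_eq_getElem _ _ hb]
        simp
      rw [hrepr]
      exact ih arr query lo (hi - 1) 0 (count + 1) (by omega) (by omega) (by omega)
    · rw [if_neg hq, if_neg hq]
      have hrepr : (reprList arr lo hi boost).tail.dropLast ++ [arr.getD hi 0 + boost + 1]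
          = reprList arr (lo + 1) hi (boost + 1) := by
        have hdrop : arr.drop lo = arr[lo]'(by omega) :: arr.drop (lo + 1) := by
          exact List.drop_eq_getElem_cons (by omega)
        have h1 : hi - lo = (hi - (lo + 1)) + 1 := by omega
        simp only [reprList, hdrop, h1, List.take_succ_cons, List.cons_append, List.tail_cons,
          List.dropLast_concat]
        rw [List.append_cancel_left_eq]
        congr 1
        omega
      rw [hrepr]
      exact ih arr query (lo + 1) hi (boost + 1) count (by omega) (by omega) (by omega)

theorem repr_full (arr : List Int) (boost : Int) (h : arr ≠ []) :
    reprList arr 0 (arr.length - 1) boost = arr.dropLast ++ [arr.getLast h + boost] := by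
  simp only [reprList, List.drop_zero, Nat.sub_zero]
  congr 1
  · rw [List.dropLast_eq_take]
  · congr 1
    rw [List.getLast_eq_getElem, List.getD_eq_getElem]

-- ===== VERDICT (by name: the statement is the Claim_ definition above) =====
theorem cannibals_spec : Claim_equal_cannibals := by
  intro int_set query _ hpre
  unfold Spec_cannibals cannibals cannibals_alt
  set arr := PySem.List.sorted int_set (fun x => x) false with harr
  have hne : arr ≠ [] := by
    intro h0
    have := PySem.List.length_sorted (xs := int_set) (key := fun x => x) (rev := false)
    rw [harr] at h0
    rw [h0] at this
    exact hpre (List.eq_nil_of_length_eq_zero (by simpa using this.symm))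
  have hlen : 0 < arr.length := List.length_pos_iff.mpr hne
  have := loop_agree (arr.length - 1) arr query 0 (arr.length - 1) 0 0 rfl (by omega) (by omega)
  rw [← this, repr_full arr 0 hne]
  rw [show arr.getLast hne + 0 = arr.getLast hne from add_zero _,
    List.dropLast_append_getLast hne]
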